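-- pv_equiv track=rewrite | github.com/Vif5050/Roulette-Bot | roulette_bot.py | get_side_score
-- ===== SOURCE A (Python) =====
-- WHEEL_ORDER = [0, 32, 15, 19, 4, 21, 2, 25, 17, 34, 6, 27, 13, 36, 11, 30, 8, 23, 10, 5, 24, 16, 33, 1, 20, 14, 31, 9, 22, 18, 29, 7, 28, 12, 35, 3, 26]
--
-- def get_side_score(recent):
--     """Find consecutive triples in wheel order with recency weighting"""
--     best_score = 0
--     best_triple = None
--
--     # Check all possible consecutive triples
--     for i in range(1, len(WHEEL_ORDER) - 3):
--         a, b, c = WHEEL_ORDER[i], WHEEL_ORDER[i+1], WHEEL_ORDER[i+2]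
--         triple = [a, b, c]
--         score = 0
--
--         # Weight recent appearances
--         for idx, num in enumerate(recent[:20]):
--             if num in triple:
--                 score += (20 - idx)  # More recent = higher weight
--
--         if score > best_score:
--             best_score = score
--             best_triple = triple
--
--     if best_triple:
--         i = WHEEL_ORDER.index(best_triple[0])
--         return best_score, [
--             WHEEL_ORDER[i-1],
--             *best_triple,
--             WHEEL_ORDER[i+3]
--         ]
--     return 0, []
-- ===== SOURCE B (Python) =====
-- WHEEL_ORDER = [0, 32, 15, 19, 4, 21, 2, 25, 17, 34, 6, 27, 13, 36, 11, 30, 8, 23, 10, 5, 24, 16, 33, 1, 20, 14, 31, 9, 22, 18, 29, 7, 28, 12, 35, 3, 26]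
--
-- def get_side_score(recent):
--     # One pass builds a recency-weight table; the triple scan then just sums three lookups
--     # and remembers the winning wheel index, so the 5-window is a direct slice (no .index).
--     weight = {}
--     for idx, num in enumerate(recent[:20]):
--         weight[num] = weight.get(num, 0) + (20 - idx)
--     best_score = 0
--     best_i = None
--     for i in range(1, len(WHEEL_ORDER) - 3):
--         score = (weight.get(WHEEL_ORDER[i], 0)
--                  + weight.get(WHEEL_ORDER[i + 1], 0)
--                  + weight.get(WHEEL_ORDER[i + 2], 0))
--         if score > best_score:
--             best_score = score
--             best_i = i
--     if best_i is None:
--         return 0, []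
--     return best_score, WHEEL_ORDER[best_i - 1:best_i + 4]
-- ===== Notes on version B (the rewrite author's own statement) =====
-- stated objective: alternative
-- what changed: B builds a recency-weight dict over recent[:20] once and scores each wheel triple by three dict lookups instead of rescanning recent per triple, and it remembers the winning wheel index so the 5-element window is a direct slice instead of a WHEEL_ORDER.index lookup.
import Mathlib
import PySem

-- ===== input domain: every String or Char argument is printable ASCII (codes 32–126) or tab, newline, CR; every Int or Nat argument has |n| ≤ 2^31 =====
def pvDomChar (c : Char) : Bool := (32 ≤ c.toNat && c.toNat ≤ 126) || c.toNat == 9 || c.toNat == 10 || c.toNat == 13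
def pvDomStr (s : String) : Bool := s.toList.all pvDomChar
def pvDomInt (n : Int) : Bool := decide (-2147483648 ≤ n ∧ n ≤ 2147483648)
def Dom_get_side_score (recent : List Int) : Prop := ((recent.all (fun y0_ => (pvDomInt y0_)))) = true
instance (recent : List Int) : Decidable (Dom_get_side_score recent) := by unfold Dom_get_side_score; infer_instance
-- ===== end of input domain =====

-- B replaces A's per-triple rescan of recent[:20] by a recency-weight table built once,
-- then scores each triple with three lookups and slices the 5-window from the kept index (alternative).

def pvWheel : List Int := [0, 32, 15, 19, 4, 21, 2, 25, 17, 34, 6, 27, 13, 36, 11, 30, 8, 23, 10, 5, 24, 16, 33, 1, 20, 14, 31, 9, 22, 18, 29, 7, 28, 12, 35, 3, 26]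

-- ===== PORT A =====
-- indices into pvWheel are always in range in this loop, so the pyGetD/.getD defaults are never taken
def get_side_score (recent : List Int) : Int × List Int :=
  let st := (PySem.List.pyRange 1 ((pvWheel.length : Int) - 3) 1).foldl
    (fun (st : Int × Option (List Int)) i =>
      let a := PySem.List.pyGetD pvWheel i 0
      let b := PySem.List.pyGetD pvWheel (i+1) 0
      let c := PySem.List.pyGetD pvWheel (i+2) 0
      let triple := [a, b, c]
      let score := (PySem.List.enumerate (PySem.List.slice recent none (some 20)) 0).foldl
        (fun acc p => if p.2 ∈ triple then acc + (20 - p.1) else acc) 0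
      if score > st.1 then (score, some triple) else st)
    (0, none)
  match st.2 with
  | some t =>
      -- 'if best_triple:' — t is always a 3-element list here, hence truthy;
      -- WHEEL_ORDER.index never raises since t[0] ∈ WHEEL_ORDER
      let i := (PySem.List.index? pvWheel (PySem.List.pyGetD t 0 0)).getD 0
      (st.1, [PySem.List.pyGetD pvWheel ((i : Int) - 1) 0] ++ t ++ [PySem.List.pyGetD pvWheel ((i : Int) + 3) 0])
  | none => (0, [])

-- ===== PORT B =====
def get_side_score_alt (recent : List Int) : Int × List Int :=
  let weight := (PySem.List.enumerate (PySem.List.slice recent none (some 20)) 0).foldl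
    (fun (d : PySem.Dict Int Int) p => d.modify p.2 0 (· + (20 - p.1))) PySem.Dict.empty
  let st := (PySem.List.pyRange 1 ((pvWheel.length : Int) - 3) 1).foldl
    (fun (st : Int × Option Int) i =>
      let score := weight.getD (PySem.List.pyGetD pvWheel i 0) 0
                 + weight.getD (PySem.List.pyGetD pvWheel (i+1) 0) 0
                 + weight.getD (PySem.List.pyGetD pvWheel (i+2) 0) 0
      if score > st.1 then (score, some i) else st)
    (0, none)
  match st.2 with
  | none => (0, [])
  | some i => (st.1, PySem.List.slice pvWheel (some (i-1)) (some (i+4)))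

-- ===== PRECONDITION & SPEC =====
def Spec_get_side_score (recent : List Int) (out : Int × List Int) : Prop := out = get_side_score_alt recent
instance (recent : List Int) (out : Int × List Int) : Decidable (Spec_get_side_score recent out) := by unfold Spec_get_side_score; infer_instance

-- ===== CLAIM (what is proved, stated in full; the proofs are below) =====
def Claim_equal_get_side_score : Prop := ∀ (recent : List Int), Dom_get_side_score recent → Spec_get_side_score recent (get_side_score recent)

-- ===== LEMMAS AND PROOFS =====

-- the weight dict's lookup is the recency-sum over matching enumerate entries
lemma pv_weight_getD (l : List (Int × Int)) (x : Int) :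
    ∀ d : PySem.Dict Int Int,
      (l.foldl (fun d p => d.modify p.2 0 (· + (20 - p.1))) d).getD x 0
        = d.getD x 0 + ((l.filter (fun p => p.2 == x)).map (fun p => 20 - p.1)).sum := by
  induction l with
  | nil => intro d; simp
  | cons hd tl ih =>
      intro d
      simp only [List.foldl_cons, ih, List.filter_cons, PySem.Dict.getD_modify]
      by_cases h : hd.2 = x
      · simp [h]
        ring
      · have h2 : ¬ x = hd.2 := fun hxy => h hxy.symm
        have h3 : (hd.2 == x) = false := by simpa using h
        simp [h2, h3]

-- a membership-filtered sum over three distinct values splits into three equality-filtered sums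
lemma pv_sum_split (a b c : Int) (hab : a ≠ b) (hac : a ≠ c) (hbc : b ≠ c)
    (l : List (Int × Int)) (f : Int × Int → Int) :
    ((l.filter (fun p => decide (p.2 ∈ ([a, b, c] : List Int)))).map f).sum
      = ((l.filter (fun p => p.2 == a)).map f).sum
      + ((l.filter (fun p => p.2 == b)).map f).sum
      + ((l.filter (fun p => p.2 == c)).map f).sum := by
  induction l with
  | nil => simp
  | cons hd tl ih =>
      rw [List.filter_cons, List.filter_cons, List.filter_cons, List.filter_cons]
      by_cases h1 : hd.2 = a
      · have hm : decide (hd.2 ∈ ([a, b, c] : List Int)) = true := by simp [h1]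
        have ha' : (hd.2 == a) = true := by simp [h1]
        have hb' : (hd.2 == b) = false := by simp [h1, hab]
        have hc' : (hd.2 == c) = false := by simp [h1, hac]
        rw [hm, ha', hb', hc']
        simp only [Bool.false_eq_true, if_true, if_false, List.map_cons, List.sum_cons, ih]
        ring
      · by_cases h2 : hd.2 = b
        · have hm : decide (hd.2 ∈ ([a, b, c] : List Int)) = true := by simp [h2]
          have ha' : (hd.2 == a) = false := by simp [h1]
          have hb' : (hd.2 == b) = true := by simp [h2]
          have hc' : (hd.2 == c) = false := by simp [h2, hbc]
          rw [hm, ha', hb', hc']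
          simp only [Bool.false_eq_true, if_true, if_false, List.map_cons, List.sum_cons, ih]
          ring
        · by_cases h3 : hd.2 = c
          · have hm : decide (hd.2 ∈ ([a, b, c] : List Int)) = true := by simp [h3]
            have ha' : (hd.2 == a) = false := by simp [h1]
            have hb' : (hd.2 == b) = false := by simp [h2]
            have hc' : (hd.2 == c) = true := by simp [h3]
            rw [hm, ha', hb', hc']
            simp only [Bool.false_eq_true, if_true, if_false, List.map_cons, List.sum_cons, ih]
            ring
          · have hm : decide (hd.2 ∈ ([a, b, c] : List Int)) = false := by simp [h1, h2, h3]
            have ha' : (hd.2 == a) = false := by simp [h1]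
            have hb' : (hd.2 == b) = false := by simp [h2]
            have hc' : (hd.2 == c) = false := by simp [h3]
            rw [hm, ha', hb', hc']
            simp only [Bool.false_eq_true, if_false, ih]

-- concrete facts about the literal wheel, checked by decide
lemma pv_wheel_facts : ∀ i ∈ PySem.List.pyRange 1 34 1,
    (PySem.List.pyGetD pvWheel i 0 ≠ PySem.List.pyGetD pvWheel (i+1) 0
      ∧ PySem.List.pyGetD pvWheel i 0 ≠ PySem.List.pyGetD pvWheel (i+2) 0
      ∧ PySem.List.pyGetD pvWheel (i+1) 0 ≠ PySem.List.pyGetD pvWheel (i+2) 0)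
    ∧ ([PySem.List.pyGetD pvWheel ((((PySem.List.index? pvWheel (PySem.List.pyGetD ([PySem.List.pyGetD pvWheel i 0, PySem.List.pyGetD pvWheel (i+1) 0, PySem.List.pyGetD pvWheel (i+2) 0] : List Int) 0 0)).getD 0 : Int)) - 1) 0]
        ++ [PySem.List.pyGetD pvWheel i 0, PySem.List.pyGetD pvWheel (i+1) 0, PySem.List.pyGetD pvWheel (i+2) 0]
        ++ [PySem.List.pyGetD pvWheel ((((PySem.List.index? pvWheel (PySem.List.pyGetD ([PySem.List.pyGetD pvWheel i 0, PySem.List.pyGetD pvWheel (i+1) 0, PySem.List.pyGetD pvWheel (i+2) 0] : List Int) 0 0)).getD 0 : Int)) + 3) 0])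
          = PySem.List.slice pvWheel (some (i-1)) (some (i+4)) := by
  decide

-- the two best-tracking folds stay related: equal best scores, and A's kept triple is B's kept index applied to T
lemma pv_fold_rel (f g : Int → Int) (T : Int → List Int) (rng : List Int)
    (hfg : ∀ i ∈ rng, f i = g i) :
    ∀ (l : List Int), (∀ i ∈ l, i ∈ rng) →
    ∀ (s : Int) (ot : Option (List Int)) (oi : Option Int),
      (ot = none ∧ oi = none ∨ ∃ j, j ∈ rng ∧ oi = some j ∧ ot = some (T j)) →
      (l.foldl (fun st i => if f i > st.1 then (f i, some (T i)) else st) (s, ot)).1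
        = (l.foldl (fun st i => if g i > st.1 then (g i, some i) else st) (s, oi)).1
      ∧ ((l.foldl (fun st i => if f i > st.1 then (f i, some (T i)) else st) (s, ot)).2 = none
          ∧ (l.foldl (fun st i => if g i > st.1 then (g i, some i) else st) (s, oi)).2 = none
        ∨ ∃ j, j ∈ rng
            ∧ (l.foldl (fun st i => if g i > st.1 then (g i, some i) else st) (s, oi)).2 = some j
            ∧ (l.foldl (fun st i => if f i > st.1 then (f i, some (T i)) else st) (s, ot)).2 = some (T j)) := by
  intro l
  induction l with
  | nil =>
      intro _ s ot oi hrel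
      rcases hrel with ⟨h1, h2⟩ | ⟨j, hj, h1, h2⟩
      · exact ⟨rfl, Or.inl ⟨h1, h2⟩⟩
      · exact ⟨rfl, Or.inr ⟨j, hj, h1, h2⟩⟩
  | cons hd tl ih =>
      intro hl s ot oi hrel
      have hhd : hd ∈ rng := hl hd (by simp)
      have hfg' := hfg hd hhd
      simp only [List.foldl_cons, hfg']
      by_cases hc : g hd > s
      · rw [if_pos hc, if_pos hc]
        exact ih (fun i hi => hl i (by simp [hi])) _ _ _ (Or.inr ⟨hd, hhd, rfl, rfl⟩)
      · rw [if_neg hc, if_neg hc]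
        exact ih (fun i hi => hl i (by simp [hi])) _ _ _ hrel

-- ===== VERDICT (by name: the statement is the Claim_ definition above) =====
theorem get_side_score_spec : Claim_equal_get_side_score := by
  intro recent _
  unfold Spec_get_side_score
  have hlen : ((pvWheel.length : Int) - 3) = 34 := by decide
  simp only [get_side_score, get_side_score_alt, hlen]
  set l := PySem.List.enumerate (PySem.List.slice recent none (some 20)) 0 with hl
  set W := l.foldl (fun (d : PySem.Dict Int Int) p => d.modify p.2 0 (· + (20 - p.1))) PySem.Dict.empty with hW
  have hscore : ∀ i ∈ PySem.List.pyRange 1 34 1,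
      (l.foldl (fun acc p => if p.2 ∈ ([PySem.List.pyGetD pvWheel i 0, PySem.List.pyGetD pvWheel (i+1) 0, PySem.List.pyGetD pvWheel (i+2) 0] : List Int) then acc + (20 - p.1) else acc) 0)
        = W.getD (PySem.List.pyGetD pvWheel i 0) 0 + W.getD (PySem.List.pyGetD pvWheel (i+1) 0) 0
            + W.getD (PySem.List.pyGetD pvWheel (i+2) 0) 0 := by
    intro i hi
    obtain ⟨⟨hab, hac, hbc⟩, -⟩ := pv_wheel_facts i hi
    rw [hW, pv_weight_getD, pv_weight_getD, pv_weight_getD]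
    simp only [PySem.Dict.getD_empty, zero_add]
    rw [PySem.List.foldl_ite_eq_foldl_filter]
    simp only [PySem.List.foldl_add, zero_add]
    rw [pv_sum_split _ _ _ hab hac hbc]
  have hmain := pv_fold_rel
    (fun i => l.foldl (fun acc p => if p.2 ∈ ([PySem.List.pyGetD pvWheel i 0, PySem.List.pyGetD pvWheel (i+1) 0, PySem.List.pyGetD pvWheel (i+2) 0] : List Int) then acc + (20 - p.1) else acc) 0)
    (fun i => W.getD (PySem.List.pyGetD pvWheel i 0) 0 + W.getD (PySem.List.pyGetD pvWheel (i+1) 0) 0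
        + W.getD (PySem.List.pyGetD pvWheel (i+2) 0) 0)
    (fun i => [PySem.List.pyGetD pvWheel i 0, PySem.List.pyGetD pvWheel (i+1) 0, PySem.List.pyGetD pvWheel (i+2) 0])
    (PySem.List.pyRange 1 34 1) hscore (PySem.List.pyRange 1 34 1) (fun _ h => h)
    0 none none (Or.inl ⟨rfl, rfl⟩)
  simp only at hmain
  obtain ⟨h1, h2⟩ := hmain
  rcases h2 with ⟨hA, hB⟩ | ⟨j, hj, hB, hA⟩
  · rw [hA, hB]
  · rw [hA, hB, h1]
    dsimp only
    have hlist := (pv_wheel_facts j hj).2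
    rw [hlist]
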